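-- pv_equiv track=rewrite | github.com/SanctusDeus/Python_Mikhail_Egorkin | HM_8/game.py | max_abreast
-- ===== SOURCE A (Python) =====
-- def element(field, dx, dy): # Выводит элемент с координатами
--
--         support_line = []
--         support_line = field[dy]
--
--         return support_line[dx]
--
-- def lines_of_game(field): # Раскладывает поле на все возможные линии выигрыша
--
--         g_lines = []
--         support_line_1 = []
--         support_line_2 = []
--         support_line_3 = []
--         support_line_4 = []
--         support_line_5 = []
--         support_line_6 = []
--
--         for i in range(len(field)):
--                 for j in range(len(field)):
--                         support_line_1.append(element(field, i, j))
--                         support_line_2.append(element(field, j, i))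
--                 g_lines.append(support_line_1)
--                 g_lines.append(support_line_2)
--                 support_line_1 = []
--                 support_line_2 = []
--
--         for i in range(len(field)):
--                 for j in range(i + 1):
--                         support_line_3.append(element(field, i - j, j))
--                         support_line_5.append(element(field, len(field)- j - 1, i - j))
--                 g_lines.append(support_line_3)
--                 g_lines.append(support_line_5)
--                 support_line_3 = []
--                 support_line_5 = []
--
--         for i in range(len(field) - 1):
--                 for j in range(i + 1):
--                         support_line_4.append(element(field, len(field) - i + j - 1, len(field) - j - 1))
--                         support_line_6.append(element(field, j, len(field) - i + j - 1))
--                 g_lines.append(support_line_4)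
--                 g_lines.append(support_line_6)
--                 support_line_4 = []
--                 support_line_6 = []
--
--         return g_lines
--
-- def max_abreast(field): # Подсчитывает максимальное количество крестиков и ноликов по возможным линиям игры
--
--         glines = lines_of_game(field)
--         support_line = []
--         max_len_1 = 1
--         max_len_2 = 1
--         abreast_X = 1
--         abreast_Y = 1
--
--         for i in range(len(glines)):
--                 support_line = glines[i]
--
--                 for j in range(len(support_line)):
--                         if support_line[j] == "X":
--                                 for l in range(len(support_line) - j - 1):
--                                         if support_line[j + l] == support_line[j + l + 1] and support_line[j + l + 1] == "X":
--                                                 max_len_1 += 1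
--
--                         if support_line[j] == "O":
--                                 for l in range(len(support_line) - j - 1):
--                                         if support_line[j + l] == support_line[j + l + 1] and support_line[j + l + 1] == "O":
--                                                 max_len_2 += 1
--
--
--                         if max_len_1 > abreast_X: abreast_X = max_len_1
--
--                         if max_len_2 > abreast_Y: abreast_Y = max_len_2
--
--                         max_len_1 = 1
--                         max_len_2 = 1
--
--
--         return abreast_X, abreast_Y
-- ===== SOURCE B (Python) =====
-- def max_abreast(field):
--     n = len(field)
--     lines = []
--     for i in range(n):
--         lines.append([field[j][i] for j in range(n)])            # column i
--         lines.append([field[i][j] for j in range(n)])            # row i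
--     for i in range(n):
--         lines.append([field[j][i - j] for j in range(i + 1)])
--         lines.append([field[i - j][n - j - 1] for j in range(i + 1)])
--     for i in range(n - 1):
--         lines.append([field[n - j - 1][n - i + j - 1] for j in range(i + 1)])
--         lines.append([field[n - i + j - 1][j] for j in range(i + 1)])
--     best_x = 1
--     best_o = 1
--     for line in lines:
--         px = 0
--         po = 0
--         for a, b in zip(line, line[1:]):
--             if a == b == "X":
--                 px += 1
--             if a == b == "O":
--                 po += 1
--         best_x = max(best_x, 1 + px)
--         best_o = max(best_o, 1 + po)
--     return best_x, best_o
-- ===== Notes on version B (the rewrite author's own statement) =====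
-- stated objective: alternative
-- what changed: Per game line, A re-counts for every position the adjacent equal-symbol pairs of the whole suffix; B makes one pass per line counting adjacent equal pairs once and takes max(best, 1 + pair count), which equals A's maximum over the per-position suffix counts.
import Mathlib
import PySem

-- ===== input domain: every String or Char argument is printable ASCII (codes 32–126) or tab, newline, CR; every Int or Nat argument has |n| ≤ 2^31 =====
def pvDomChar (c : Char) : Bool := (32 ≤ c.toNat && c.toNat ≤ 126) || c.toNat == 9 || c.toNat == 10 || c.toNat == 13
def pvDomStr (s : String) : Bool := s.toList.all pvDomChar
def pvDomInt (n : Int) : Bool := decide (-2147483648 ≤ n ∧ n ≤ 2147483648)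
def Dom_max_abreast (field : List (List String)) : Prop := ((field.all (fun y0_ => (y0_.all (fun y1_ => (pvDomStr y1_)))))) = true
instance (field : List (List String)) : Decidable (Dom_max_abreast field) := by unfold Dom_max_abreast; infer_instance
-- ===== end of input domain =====

-- B replaces A's per-position suffix re-count of adjacent equal pairs by one pass per line that
-- counts the pairs once and takes 1 + pair count as the line's candidate: objective 'alternative'.

-- ===== PORT A =====
-- element(field, dx, dy) = field[dy][dx]; pyGetD is exact under Pre_ (in-range indices)
def pvElement (field : List (List String)) (dx dy : Int) : String :=
  PySem.List.pyGetD (PySem.List.pyGetD field dy []) dx ""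

def pvLinesOfGame (field : List (List String)) : List (List String) :=
  let n : Int := PySem.List.len field
  let g1 := (PySem.List.pyRange 0 n 1).foldl (fun (g : List (List String)) i =>
    let p := (PySem.List.pyRange 0 n 1).foldl
      (fun (p : List String × List String) j =>
        (p.1 ++ [pvElement field i j], p.2 ++ [pvElement field j i])) ([], [])
    g ++ [p.1] ++ [p.2]) []
  let g2 := (PySem.List.pyRange 0 n 1).foldl (fun (g : List (List String)) i =>
    let p := (PySem.List.pyRange 0 (i + 1) 1).foldl
      (fun (p : List String × List String) j =>
        (p.1 ++ [pvElement field (i - j) j], p.2 ++ [pvElement field (n - j - 1) (i - j)])) ([], [])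
    g ++ [p.1] ++ [p.2]) g1
  (PySem.List.pyRange 0 (n - 1) 1).foldl (fun (g : List (List String)) i =>
    let p := (PySem.List.pyRange 0 (i + 1) 1).foldl
      (fun (p : List String × List String) j =>
        (p.1 ++ [pvElement field (n - i + j - 1) (n - j - 1)],
         p.2 ++ [pvElement field j (n - i + j - 1)])) ([], [])
    g ++ [p.1] ++ [p.2]) g2

def max_abreast (field : List (List String)) : Int × Int :=
  let glines := pvLinesOfGame field
  (PySem.List.pyRange 0 (PySem.List.len glines) 1).foldl
    (fun (ab : Int × Int) i =>
      let sl := PySem.List.pyGetD glines i []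
      (PySem.List.pyRange 0 (PySem.List.len sl) 1).foldl
        (fun (ab : Int × Int) j =>
          let m1 : Int :=
            if PySem.List.pyGetD sl j "" = "X" then
              (PySem.List.pyRange 0 (PySem.List.len sl - j - 1) 1).foldl
                (fun (m : Int) l =>
                  if PySem.List.pyGetD sl (j + l) "" = PySem.List.pyGetD sl (j + l + 1) "" ∧
                     PySem.List.pyGetD sl (j + l + 1) "" = "X" then m + 1 else m) 1
            else 1
          let m2 : Int :=
            if PySem.List.pyGetD sl j "" = "O" then
              (PySem.List.pyRange 0 (PySem.List.len sl - j - 1) 1).foldl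
                (fun (m : Int) l =>
                  if PySem.List.pyGetD sl (j + l) "" = PySem.List.pyGetD sl (j + l + 1) "" ∧
                     PySem.List.pyGetD sl (j + l + 1) "" = "O" then m + 1 else m) 1
            else 1
          let aX := if m1 > ab.1 then m1 else ab.1
          let aY := if m2 > ab.2 then m2 else ab.2
          (aX, aY)) ab)
    (1, 1)

-- ===== PORT B =====
def max_abreast_alt (field : List (List String)) : Int × Int :=
  let n : Int := PySem.List.len field
  let l1 := (PySem.List.pyRange 0 n 1).foldl (fun (ls : List (List String)) i =>
    ls ++ [(PySem.List.pyRange 0 n 1).map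
            (fun j => PySem.List.pyGetD (PySem.List.pyGetD field j []) i "")]
       ++ [(PySem.List.pyRange 0 n 1).map
            (fun j => PySem.List.pyGetD (PySem.List.pyGetD field i []) j "")]) []
  let l2 := (PySem.List.pyRange 0 n 1).foldl (fun (ls : List (List String)) i =>
    ls ++ [(PySem.List.pyRange 0 (i + 1) 1).map
            (fun j => PySem.List.pyGetD (PySem.List.pyGetD field j []) (i - j) "")]
       ++ [(PySem.List.pyRange 0 (i + 1) 1).map
            (fun j => PySem.List.pyGetD (PySem.List.pyGetD field (i - j) []) (n - j - 1) "")]) l1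
  let lines := (PySem.List.pyRange 0 (n - 1) 1).foldl (fun (ls : List (List String)) i =>
    ls ++ [(PySem.List.pyRange 0 (i + 1) 1).map
            (fun j => PySem.List.pyGetD (PySem.List.pyGetD field (n - j - 1) []) (n - i + j - 1) "")]
       ++ [(PySem.List.pyRange 0 (i + 1) 1).map
            (fun j => PySem.List.pyGetD (PySem.List.pyGetD field (n - i + j - 1) []) j "")]) l2
  lines.foldl (fun (best : Int × Int) line =>
    let c := (line.zip (PySem.List.slice line (some 1) none)).foldl
      (fun (c : Int × Int) p =>
        (if p.1 = p.2 ∧ p.2 = "X" then c.1 + 1 else c.1,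
         if p.1 = p.2 ∧ p.2 = "O" then c.2 + 1 else c.2)) (0, 0)
    (max best.1 (1 + c.1), max best.2 (1 + c.2))) (1, 1)

-- ===== PRECONDITION & SPEC =====
-- Pre_ excludes exactly the fields on which both Pythons raise IndexError: some row shorter
-- than the number of rows (element() then indexes past the row's end).
def Pre_max_abreast (field : List (List String)) : Prop :=
  ∀ row ∈ field, field.length ≤ row.length
instance (field : List (List String)) : Decidable (Pre_max_abreast field) := by
  unfold Pre_max_abreast; infer_instance
def pvWitness_max_abreast : List (List String) := [["X", "O"], ["O", "X"]]
def Spec_max_abreast (field : List (List String)) (out : Int × Int) : Prop := out = max_abreast_alt field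
instance (field : List (List String)) (out : Int × Int) : Decidable (Spec_max_abreast field out) := by unfold Spec_max_abreast; infer_instance

-- ===== CLAIM (what is proved, stated in full; the proofs are below) =====
def Claim_equal_max_abreast : Prop := ∀ (field : List (List String)), Dom_max_abreast field → Pre_max_abreast field → Spec_max_abreast field (max_abreast field)

-- ===== LEMMAS AND PROOFS =====

def pvPC (s : String) (L : List String) : Nat :=
  (L.zip L.tail).countP (fun p => decide (p.1 = p.2 ∧ p.2 = s))

def pvSfx (s : String) (L : List String) (k : Nat) : Nat :=
  (List.range (L.length - 1 - k)).countP
    (fun l => decide (L.getD (k + l) "" = L.getD (k + l + 1) "" ∧ L.getD (k + l + 1) "" = s))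

def pvStep (L : List String) (ab : Int × Int) (k : Nat) : Int × Int :=
  let m1 : Int := if L.getD k "" = "X" then 1 + (pvSfx "X" L k : Int) else 1
  let m2 : Int := if L.getD k "" = "O" then 1 + (pvSfx "O" L k : Int) else 1
  (if m1 > ab.1 then m1 else ab.1, if m2 > ab.2 then m2 else ab.2)

def pvUpd (ab : Int × Int) (L : List String) : Int × Int :=
  (max ab.1 (1 + (pvPC "X" L : Int)), max ab.2 (1 + (pvPC "O" L : Int)))

theorem pvStep_shift (x : String) (t : List String) (ab : Int × Int) (k : Nat) :
    pvStep (x :: t) ab (k + 1) = pvStep t ab k := by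
  have hs : ∀ s, pvSfx s (x :: t) (k + 1) = pvSfx s t k := by
    intro s
    simp only [pvSfx, List.length_cons, Nat.add_sub_cancel, List.getD_cons_succ,
      Nat.add_right_comm k 1]
    rw [show t.length - (k + 1) = t.length - 1 - k by omega]
  simp [pvStep, hs]

theorem pvSfx_zero (s : String) (L : List String) : pvSfx s L 0 = pvPC s L := by
  induction L with
  | nil => rfl
  | cons x t ih =>
    cases t with
    | nil => rfl
    | cons y u =>
      have key : pvSfx s (x :: y :: u) 0 =
          (if x = y ∧ y = s then 1 else 0) + pvSfx s (y :: u) 0 := by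
        simp only [pvSfx, List.length_cons, Nat.sub_zero, Nat.add_sub_cancel, Nat.zero_add,
          List.range_succ_eq_map, List.countP_cons, List.countP_map]
        rw [Nat.add_comm]
        congr 1
        simp [List.getD]
      rw [key, ih]
      simp only [pvPC, List.tail_cons, List.zip_cons_cons, List.countP_cons]
      rw [Nat.add_comm]
      congr 1
      · simp

theorem pvPC_cons_le (s x : String) (t : List String) : pvPC s t ≤ pvPC s (x :: t) := by
  cases t with
  | nil => simp [pvPC]
  | cons y u =>
    simp only [pvPC, List.tail_cons, List.zip_cons_cons, List.countP_cons]
    omega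

theorem pvPC_cons_ne (s x : String) (t : List String) (h : x ≠ s) :
    pvPC s (x :: t) = pvPC s t := by
  cases t with
  | nil => rfl
  | cons y u =>
    simp only [pvPC, List.tail_cons, List.zip_cons_cons, List.countP_cons]
    have : ¬ (x = y ∧ y = s) := by rintro ⟨rfl, rfl⟩; exact h rfl
    simp [this]

theorem pvRangeFold (L : List String) (a b : Int) (ha : 1 ≤ a) (hb : 1 ≤ b) :
    (List.range L.length).foldl (pvStep L) (a, b) = pvUpd (a, b) L := by
  induction L generalizing a b with
  | nil =>
    simp [pvUpd, pvPC]
    omega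
  | cons x t ih =>
    rw [List.length_cons, List.range_succ_eq_map, List.foldl_cons, List.foldl_map]
    have hshift : (fun (ab : Int × Int) (k : Nat) => pvStep (x :: t) ab k.succ) = pvStep t := by
      funext ab k; exact pvStep_shift x t ab k
    rw [hshift]
    have h0 : pvStep (x :: t) (a, b) 0 =
        ((if x = "X" then max a (1 + (pvPC "X" (x :: t) : Int)) else a),
         (if x = "O" then max b (1 + (pvPC "O" (x :: t) : Int)) else b)) := by
      simp only [pvStep, List.getD_cons_zero, pvSfx_zero, Prod.mk.injEq]
      constructor <;> split_ifs <;> omega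
    rw [h0]
    have hX := pvPC_cons_le "X" x t
    have hO := pvPC_cons_le "O" x t
    by_cases hx : x = "X"
    · subst hx
      rw [if_pos rfl, if_neg (by decide), ih _ _ (le_trans ha (le_max_left _ _)) hb]
      simp only [pvUpd, Prod.mk.injEq]
      rw [pvPC_cons_ne "O" "X" t (by decide)]
      constructor
      · omega
      · rfl
    · by_cases ho : x = "O"
      · subst ho
        rw [if_neg hx, if_pos rfl, ih _ _ ha (le_trans hb (le_max_left _ _))]
        simp only [pvUpd, Prod.mk.injEq]
        rw [pvPC_cons_ne "X" "O" t (by decide)]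
        constructor
        · rfl
        · omega
      · rw [if_neg hx, if_neg ho, ih _ _ ha hb]
        simp only [pvUpd, Prod.mk.injEq]
        rw [pvPC_cons_ne "X" x t hx, pvPC_cons_ne "O" x t ho]
        exact ⟨rfl, rfl⟩

theorem pvInnerCount (L : List String) (k : Nat) (s : String) :
    (PySem.List.pyRange 0 (PySem.List.len L - (k : Int) - 1) 1).foldl
      (fun (m : Int) l =>
        if PySem.List.pyGetD L ((k : Int) + l) "" = PySem.List.pyGetD L ((k : Int) + l + 1) "" ∧
           PySem.List.pyGetD L ((k : Int) + l + 1) "" = s then m + 1 else m) 1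
    = 1 + (pvSfx s L k : Int) := by
  rw [PySem.List.pyRange_one]
  rw [show ((PySem.List.len L - (k : Int) - 1) - 0).toNat = L.length - 1 - k from by
    simp [PySem.List.len_eq]; omega]
  rw [List.foldl_map, PySem.List.foldl_ite_add_one]
  unfold pvSfx
  congr 1
  apply congrArg
  apply List.countP_congr
  intro l _
  have h1 : (k : Int) + (0 + (l : Nat)) = ((k + l : Nat) : Int) := by push_cast; ring
  rw [h1, show ((k + l : Nat) : Int) + 1 = ((k + l + 1 : Nat) : Int) from by push_cast; ring]
  simp only [PySem.List.pyGetD_natCast, List.getD_eq_getElem?_getD]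

theorem pvLineA_eq (L : List String) (ab : Int × Int) :
    (PySem.List.pyRange 0 (PySem.List.len L) 1).foldl
      (fun (ab : Int × Int) j =>
        let m1 : Int :=
          if PySem.List.pyGetD L j "" = "X" then
            (PySem.List.pyRange 0 (PySem.List.len L - j - 1) 1).foldl
              (fun (m : Int) l =>
                if PySem.List.pyGetD L (j + l) "" = PySem.List.pyGetD L (j + l + 1) "" ∧
                   PySem.List.pyGetD L (j + l + 1) "" = "X" then m + 1 else m) 1
          else 1
        let m2 : Int :=
          if PySem.List.pyGetD L j "" = "O" then
            (PySem.List.pyRange 0 (PySem.List.len L - j - 1) 1).foldl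
              (fun (m : Int) l =>
                if PySem.List.pyGetD L (j + l) "" = PySem.List.pyGetD L (j + l + 1) "" ∧
                   PySem.List.pyGetD L (j + l + 1) "" = "O" then m + 1 else m) 1
          else 1
        let aX := if m1 > ab.1 then m1 else ab.1
        let aY := if m2 > ab.2 then m2 else ab.2
        (aX, aY)) ab
    = (List.range L.length).foldl (pvStep L) ab := by
  rw [PySem.List.pyRange_one]
  rw [show ((PySem.List.len L) - 0).toNat = L.length from by simp [PySem.List.len_eq]]
  rw [List.foldl_map]
  apply PySem.List.foldl_congr_mem
  intro ab k _
  show _ = pvStep L ab k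
  simp only [zero_add, pvInnerCount L k, PySem.List.pyGetD_natCast,
    List.getD_eq_getElem?_getD, pvStep]

theorem pvLineB_eq (best : Int × Int) (L : List String) :
    (max best.1 (1 + ((L.zip (PySem.List.slice L (some 1) none)).foldl
      (fun (c : Int × Int) p =>
        (if p.1 = p.2 ∧ p.2 = "X" then c.1 + 1 else c.1,
         if p.1 = p.2 ∧ p.2 = "O" then c.2 + 1 else c.2)) (0, 0)).1),
     max best.2 (1 + ((L.zip (PySem.List.slice L (some 1) none)).foldl
      (fun (c : Int × Int) p =>
        (if p.1 = p.2 ∧ p.2 = "X" then c.1 + 1 else c.1,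
         if p.1 = p.2 ∧ p.2 = "O" then c.2 + 1 else c.2)) (0, 0)).2))
    = pvUpd best L := by
  rw [PySem.List.slice_from_one,
    PySem.List.foldl_prod_mk (f := fun (a : Int) (p : String × String) => if p.1 = p.2 ∧ p.2 = "X" then a + 1 else a)
      (g := fun (a : Int) (p : String × String) => if p.1 = p.2 ∧ p.2 = "O" then a + 1 else a),
    PySem.List.foldl_ite_add_one, PySem.List.foldl_ite_add_one]
  simp [pvUpd, pvPC]

theorem pvFoldA (ls : List (List String)) : ∀ (a b : Int), 1 ≤ a → 1 ≤ b →
    ls.foldl (fun ab L => (List.range L.length).foldl (pvStep L) ab) (a, b)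
    = ls.foldl pvUpd (a, b) := by
  induction ls with
  | nil => intro a b _ _; rfl
  | cons L t ih =>
    intro a b ha hb
    simp only [List.foldl_cons]
    rw [pvRangeFold L a b ha hb]
    exact ih _ _ (le_trans ha (le_max_left _ _)) (le_trans hb (le_max_left _ _))

theorem pvPairLoop (rs : Int → List Int) (f g : Int → Int → String)
    (r : List Int) (init : List (List String)) :
    r.foldl (fun acc i =>
      let p := (rs i).foldl (fun (p : List String × List String) j =>
        (p.1 ++ [f i j], p.2 ++ [g i j])) ([], [])
      acc ++ [p.1] ++ [p.2]) init
    = r.foldl (fun acc i => acc ++ [(rs i).map (f i)] ++ [(rs i).map (g i)]) init := by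
  induction r generalizing init with
  | nil => rfl
  | cons x t ih =>
    simp only [List.foldl_cons]
    rw [PySem.List.foldl_prod_mk (f := fun a j => a ++ [f x j]) (g := fun a j => a ++ [g x j]),
      PySem.List.foldl_append_singleton_eq_map, PySem.List.foldl_append_singleton_eq_map,
      List.nil_append, List.nil_append, ih]

theorem pvLines_eq (field : List (List String)) :
    pvLinesOfGame field =
      (let n : Int := PySem.List.len field
      let l1 := (PySem.List.pyRange 0 n 1).foldl (fun (ls : List (List String)) i =>
        ls ++ [(PySem.List.pyRange 0 n 1).map
                (fun j => PySem.List.pyGetD (PySem.List.pyGetD field j []) i "")]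
           ++ [(PySem.List.pyRange 0 n 1).map
                (fun j => PySem.List.pyGetD (PySem.List.pyGetD field i []) j "")]) []
      let l2 := (PySem.List.pyRange 0 n 1).foldl (fun (ls : List (List String)) i =>
        ls ++ [(PySem.List.pyRange 0 (i + 1) 1).map
                (fun j => PySem.List.pyGetD (PySem.List.pyGetD field j []) (i - j) "")]
           ++ [(PySem.List.pyRange 0 (i + 1) 1).map
                (fun j => PySem.List.pyGetD (PySem.List.pyGetD field (i - j) []) (n - j - 1) "")]) l1
      (PySem.List.pyRange 0 (n - 1) 1).foldl (fun (ls : List (List String)) i =>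
        ls ++ [(PySem.List.pyRange 0 (i + 1) 1).map
                (fun j => PySem.List.pyGetD (PySem.List.pyGetD field (n - j - 1) []) (n - i + j - 1) "")]
           ++ [(PySem.List.pyRange 0 (i + 1) 1).map
                (fun j => PySem.List.pyGetD (PySem.List.pyGetD field (n - i + j - 1) []) j "")]) l2) := by
  simp only [pvLinesOfGame, pvElement]
  rw [pvPairLoop, pvPairLoop, pvPairLoop]

-- ===== VERDICT (by name: the statement is the Claim_ definition above) =====
theorem max_abreast_spec : Claim_equal_max_abreast := by
  intro field _ _
  simp only [Spec_max_abreast, max_abreast, max_abreast_alt]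
  rw [PySem.List.foldl_pyRange_zero_pyGetD (pvLinesOfGame field) []
    (fun (ab : Int × Int) (sl : List String) =>
      (PySem.List.pyRange 0 (PySem.List.len sl) 1).foldl
        (fun (ab : Int × Int) j =>
          let m1 : Int :=
            if PySem.List.pyGetD sl j "" = "X" then
              (PySem.List.pyRange 0 (PySem.List.len sl - j - 1) 1).foldl
                (fun (m : Int) l =>
                  if PySem.List.pyGetD sl (j + l) "" = PySem.List.pyGetD sl (j + l + 1) "" ∧
                     PySem.List.pyGetD sl (j + l + 1) "" = "X" then m + 1 else m) 1
            else 1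
          let m2 : Int :=
            if PySem.List.pyGetD sl j "" = "O" then
              (PySem.List.pyRange 0 (PySem.List.len sl - j - 1) 1).foldl
                (fun (m : Int) l =>
                  if PySem.List.pyGetD sl (j + l) "" = PySem.List.pyGetD sl (j + l + 1) "" ∧
                     PySem.List.pyGetD sl (j + l + 1) "" = "O" then m + 1 else m) 1
            else 1
          let aX := if m1 > ab.1 then m1 else ab.1
          let aY := if m2 > ab.2 then m2 else ab.2
          (aX, aY)) ab) (1, 1)]
  rw [show (fun (ab : Int × Int) (sl : List String) =>
      (PySem.List.pyRange 0 (PySem.List.len sl) 1).foldl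
        (fun (ab : Int × Int) j =>
          let m1 : Int :=
            if PySem.List.pyGetD sl j "" = "X" then
              (PySem.List.pyRange 0 (PySem.List.len sl - j - 1) 1).foldl
                (fun (m : Int) l =>
                  if PySem.List.pyGetD sl (j + l) "" = PySem.List.pyGetD sl (j + l + 1) "" ∧
                     PySem.List.pyGetD sl (j + l + 1) "" = "X" then m + 1 else m) 1
            else 1
          let m2 : Int :=
            if PySem.List.pyGetD sl j "" = "O" then
              (PySem.List.pyRange 0 (PySem.List.len sl - j - 1) 1).foldl
                (fun (m : Int) l =>
                  if PySem.List.pyGetD sl (j + l) "" = PySem.List.pyGetD sl (j + l + 1) "" ∧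
                     PySem.List.pyGetD sl (j + l + 1) "" = "O" then m + 1 else m) 1
            else 1
          let aX := if m1 > ab.1 then m1 else ab.1
          let aY := if m2 > ab.2 then m2 else ab.2
          (aX, aY)) ab)
      = (fun ab L => (List.range L.length).foldl (pvStep L) ab) from
    funext fun ab => funext fun L => pvLineA_eq L ab]
  rw [pvFoldA _ 1 1 le_rfl le_rfl]
  rw [show (fun (best : Int × Int) (line : List String) =>
      let c := (line.zip (PySem.List.slice line (some 1) none)).foldl
        (fun (c : Int × Int) p =>
          (if p.1 = p.2 ∧ p.2 = "X" then c.1 + 1 else c.1,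
           if p.1 = p.2 ∧ p.2 = "O" then c.2 + 1 else c.2)) (0, 0)
      (max best.1 (1 + c.1), max best.2 (1 + c.2)))
      = pvUpd from funext fun best => funext fun L => pvLineB_eq best L]
  rw [pvLines_eq]
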